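-- pv_equiv track=rewrite | github.com/cz-fish/advent-of-code | 2025/03.py | joltage
-- ===== SOURCE A (Python) =====
-- def joltage(line, remaining):
--     assert len(line) >= remaining, f"{line} {remaining}"
--     remaining -= 1
--     first = sorted(line[:len(line) - remaining])[-1]
--     if remaining == 0:
--         return first
--     else:
--         first_index = line.index(first)
--         rest = line[first_index+1:]
--         return first + joltage(rest, remaining)
-- ===== SOURCE B (Python) =====
-- def joltage(line, remaining):
--     assert 1 <= remaining <= len(line)
--     n = len(line)
--     total = 0
--     start = 0
--     end = n - remaining + 1
--     for _ in range(remaining):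
--         best = start
--         for i in range(start + 1, end):
--             if line[i] > line[best]:
--                 best = i
--         total += line[best]
--         start = best + 1
--         end += 1
--     return total
-- ===== Notes on version B (the rewrite author's own statement) =====
-- stated objective: alternative
-- what changed: Replaced the recursive sort-prefix/list.index/slice scheme by an iterative sliding-window argmax scan: one linear scan per pick over a shrinking window, no sorting, no slicing, no recursion.
import Mathlib
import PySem

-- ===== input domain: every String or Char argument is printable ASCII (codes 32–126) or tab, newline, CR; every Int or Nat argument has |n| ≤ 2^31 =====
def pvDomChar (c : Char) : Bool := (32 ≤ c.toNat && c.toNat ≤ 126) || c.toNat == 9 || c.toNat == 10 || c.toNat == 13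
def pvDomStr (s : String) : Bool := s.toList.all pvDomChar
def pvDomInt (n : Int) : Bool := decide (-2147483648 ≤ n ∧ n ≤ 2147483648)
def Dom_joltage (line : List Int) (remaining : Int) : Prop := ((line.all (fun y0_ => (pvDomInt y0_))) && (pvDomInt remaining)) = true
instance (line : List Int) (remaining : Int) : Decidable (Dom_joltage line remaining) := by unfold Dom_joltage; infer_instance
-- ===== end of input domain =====

-- B replaces A's recursive sort-prefix/index/slice greedy by an iterative sliding-window
-- argmax scan (no sorting, no slicing, no recursion).

-- ===== PORT A =====
-- literal transliteration of Source A; the 'assert' failure and the IndexError of sorted([])[-1]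
-- (and the unreachable ValueError of .index) are the raising branches Pre_ excludes (0 returned there)
def joltage (line : List Int) (remaining : Int) : Int :=
  if (line.length : Int) < remaining then 0   -- AssertionError; excluded by Pre_
  else
    match PySem.List.pyGet? (PySem.List.sorted (PySem.List.slice line none (some ((line.length : Int) - (remaining - 1)))) (fun x => x) false) (-1) with
    | none => 0                               -- IndexError on empty prefix; excluded by Pre_
    | some first =>
      if remaining - 1 = 0 then first
      else
        match hI : PySem.List.index? line first with
        | none => 0                           -- ValueError; unreachable (first ∈ line)
        | some i =>
          first + joltage (PySem.List.slice line (some ((i : Int) + 1)) none) (remaining - 1)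
termination_by line.length
decreasing_by
  have hi := PySem.List.getElem_of_index?_eq_some hI
  obtain ⟨hk, -, -⟩ := hi
  have : ((i : Int) + 1) = (((i + 1 : Nat)) : Int) := by push_cast; ring
  rw [this, PySem.List.slice_from_natCast]
  simp only [List.length_drop]
  omega

-- ===== PORT B =====
-- inner loop of Source B: for i in range(i, fin): if line[i] > line[best]: best = i
def bestIdx (line : List Int) (best i fin : Nat) : Nat :=
  if i < fin then
    bestIdx line (if line.getD best 0 < line.getD i 0 then i else best) (i + 1) fin
  else best
termination_by fin - i

-- outer loop of Source B: repeat 'remaining' times, carrying (total, start, end)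
def altLoop (line : List Int) (k : Nat) (total : Int) (start fin : Nat) : Int :=
  match k with
  | 0 => total
  | k + 1 =>
      let best := bestIdx line start (start + 1) fin
      altLoop line k (total + line.getD best 0) (best + 1) (fin + 1)

def joltage_alt (line : List Int) (remaining : Int) : Int :=
  if remaining < 1 ∨ (line.length : Int) < remaining then 0   -- Source B's assert; excluded by Pre_
  else altLoop line remaining.toNat 0 0 (line.length + 1 - remaining.toNat)

-- ===== PRECONDITION & SPEC =====
-- Pre_: exactly where Python A returns normally; remaining < 1 or remaining > len(line)
-- makes A raise (AssertionError, or IndexError from sorted([])[-1]).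
def Pre_joltage (line : List Int) (remaining : Int) : Prop :=
  1 ≤ remaining ∧ remaining ≤ (line.length : Int)
instance (line : List Int) (remaining : Int) : Decidable (Pre_joltage line remaining) := by
  unfold Pre_joltage; infer_instance

def pvWitness_joltage : List Int × Int := ([3, 1, 4, 1, 5], 3)

def Spec_joltage (line : List Int) (remaining : Int) (out : Int) : Prop := out = joltage_alt line remaining
instance (line : List Int) (remaining : Int) (out : Int) : Decidable (Spec_joltage line remaining out) := by unfold Spec_joltage; infer_instance

-- ===== CLAIM (what is proved, stated in full; the proofs are below) =====
def Claim_equal_joltage : Prop := ∀ (line : List Int) (remaining : Int), Dom_joltage line remaining → Pre_joltage line remaining → Spec_joltage line remaining (joltage line remaining)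

-- ===== LEMMAS AND PROOFS =====

-- last element of a (≤)-pairwise list bounds every element
theorem pairwise_le_getLast {l : List Int} (h : l.Pairwise (· ≤ ·)) (hne : l ≠ [])
    {x : Int} (hx : x ∈ l) : x ≤ l.getLast hne := by
  obtain ⟨i, hi, rfl⟩ := List.getElem_of_mem hx
  rw [List.getLast_eq_getElem]
  rcases Nat.lt_or_ge i (l.length - 1) with hlt | hge
  · exact (List.pairwise_iff_getElem.1 h) i (l.length - 1) hi (by omega) hlt
  · have : i = l.length - 1 := by omega
    subst this; exact le_refl _

-- sorted(p)[-1] = some M with M ∈ p a maximum of p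
theorem sorted_neg_one_max (p : List Int) (hp : p ≠ []) :
    ∃ M, PySem.List.pyGet? (PySem.List.sorted p (fun x => x) false) (-1) = some M ∧
      M ∈ p ∧ ∀ y ∈ p, y ≤ M := by
  set s := PySem.List.sorted p (fun x => x) false with hs
  have hperm : s.Perm p := PySem.List.sorted_perm p (fun x => x) false
  have hsne : s ≠ [] := by
    intro h
    apply hp
    have hlen := hperm.length_eq
    rw [h] at hlen
    exact List.eq_nil_of_length_eq_zero hlen.symm
  refine ⟨s.getLast hsne, ?_, ?_, ?_⟩
  · rw [PySem.List.pyGet?_neg_one]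
    exact List.getLast?_eq_some_getLast (h := hsne)
  · exact hperm.mem_iff.1 (List.getLast_mem hsne)
  · intro y hy
    have hpw : s.Pairwise (fun a b => (fun x => x) a ≤ (fun x => x) b) :=
      PySem.List.sorted_pairwise p (fun x => x)
    exact pairwise_le_getLast (by simpa using hpw) hsne (hperm.mem_iff.2 hy)

-- invariant of the inner scan: bestIdx returns the first argmax of line.getD over [s, fin)
theorem bestIdx_spec (line : List Int) (s : Nat) :
    ∀ fuel i best fin, fin - i ≤ fuel → best < i → s ≤ best →
    (∀ k, s ≤ k → k < i → line.getD k 0 ≤ line.getD best 0) →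
    (∀ k, s ≤ k → k < best → line.getD k 0 < line.getD best 0) →
    s ≤ bestIdx line best i fin ∧ (bestIdx line best i fin < max i fin) ∧
      (∀ k, s ≤ k → k < fin → line.getD k 0 ≤ line.getD (bestIdx line best i fin) 0) ∧
      (∀ k, s ≤ k → k < bestIdx line best i fin → line.getD k 0 < line.getD (bestIdx line best i fin) 0) := by
  intro fuel
  induction fuel with
  | zero =>
    intro i best fin hfuel hbi hsb hle hlt
    have hfi : ¬ i < fin := by omega
    rw [bestIdx, if_neg hfi]
    exact ⟨hsb, by omega, fun k hk1 hk2 => hle k hk1 (by omega), hlt⟩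
  | succ fuel ih =>
    intro i best fin hfuel hbi hsb hle hlt
    rw [bestIdx]
    by_cases hfi : i < fin
    · rw [if_pos hfi]
      by_cases hc : line.getD best 0 < line.getD i 0
      · rw [if_pos hc]
        obtain ⟨a, b, c, d⟩ := ih (i + 1) i fin (by omega) (by omega) (by omega)
          (fun k hk1 hk2 => by
            by_cases hki : k = i
            · subst hki; exact le_refl _
            · exact le_of_lt (lt_of_le_of_lt (hle k hk1 (by omega)) hc))
          (fun k hk1 hk2 => lt_of_le_of_lt (hle k hk1 (by omega)) hc)
        exact ⟨a, by omega, c, d⟩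
      · rw [if_neg hc]
        obtain ⟨a, b, c, d⟩ := ih (i + 1) best fin (by omega) (by omega) hsb
          (fun k hk1 hk2 => by
            by_cases hki : k = i
            · subst hki; omega
            · exact hle k hk1 (by omega))
          hlt
        exact ⟨a, by omega, c, d⟩
    · rw [if_neg hfi]
      exact ⟨hsb, by omega, fun k hk1 hk2 => hle k hk1 (by omega), hlt⟩

-- the first-argmax characterisation is unique
theorem argmax_unique (line : List Int) (s : Nat) (j1 j2 : Nat)
    (h1a : s ≤ j1) (h2a : s ≤ j2)
    (h1b : ∀ k, s ≤ k → k < j1 → line.getD k 0 < line.getD j1 0)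
    (h2b : ∀ k, s ≤ k → k < j2 → line.getD k 0 < line.getD j2 0)
    (h1c : line.getD j2 0 ≤ line.getD j1 0)
    (h2c : line.getD j1 0 ≤ line.getD j2 0) : j1 = j2 := by
  rcases lt_trichotomy j1 j2 with h | h | h
  · have := h2b j1 h1a h; omega
  · exact h
  · have := h1b j2 h2a h; omega

-- getD through drop/take
theorem getD_drop_take (line : List Int) (start m j : Nat) (hj : j < m) :
    ((line.drop start).take m).getD j 0 = line.getD (start + j) 0 := by
  simp only [List.getD]
  rw [List.getElem?_take_of_lt hj, List.getElem?_drop]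

-- accumulator of altLoop splits off
theorem altLoop_add (line : List Int) :
    ∀ k total start fin, altLoop line k total start fin = total + altLoop line k 0 start fin := by
  intro k
  induction k with
  | zero => intro total start fin; simp [altLoop]
  | succ k ih =>
    intro total start fin
    simp only [altLoop]
    rw [ih (total + _), ih (0 + _)]
    ring

-- main correspondence: A on the suffix line.drop start = B's remaining loop
theorem main_loop (line : List Int) :
    ∀ k start, 1 ≤ k → start + k ≤ line.length →
    joltage (line.drop start) (k : Int)
      = altLoop line k 0 start (start + (line.length - start) + 1 - k) := by
  intro k
  induction k with
  | zero => intro start h1; omega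
  | succ k ih =>
    intro start h1 h2
    set l := line.drop start with hl
    have hlen : l.length = line.length - start := by simp [hl]
    set m : Nat := l.length - k with hm   -- prefix length, ≥ 1
    have hm1 : 1 ≤ m := by omega
    have hmle : m ≤ l.length := by omega
    have hpl : (l.take m).length = m := by rw [List.length_take]; omega
    have hpne : l.take m ≠ [] := by
      intro h; rw [h] at hpl; simp at hpl; omega
    obtain ⟨M, hMeq, hMmem, hMmax⟩ := sorted_neg_one_max (l.take m) hpne
    have hMl : M ∈ l := List.mem_of_mem_take hMmem
    -- an index of M inside the prefix
    obtain ⟨jm, hjm, hjmval⟩ := List.getElem_of_mem hMmem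
    have hjmlt : jm < m := by rw [hpl] at hjm; exact hjm
    have hjmval' : l[jm]'(by omega) = M := by
      have := hjmval; rwa [List.getElem_take] at this
    -- getD of line at absolute indices vs l
    have habs : ∀ t : Nat, t < l.length → line.getD (start + t) 0 = l.getD t 0 := by
      intro t ht
      simp [List.getD, hl, List.getElem?_drop]
    have hMat : line.getD (start + jm) 0 = M := by
      rw [habs jm (by omega), List.getD_eq_getElem l 0 (by omega), hjmval']
    -- every window element is ≤ M
    have hwinM : ∀ t, start ≤ t → t < start + m → line.getD t 0 ≤ M := by
      intro t ht1 ht2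
      have htl : t - start < m := by omega
      have he := getD_drop_take line start m (t - start) htl
      rw [show start + (t - start) = t from by omega] at he
      rw [← he, ← hl, List.getD_eq_getElem _ 0 (by rw [hpl]; omega)]
      exact hMmax _ (List.getElem_mem _)
    -- B's step: bestIdx over the window
    have hfin : start + (line.length - start) + 1 - (k + 1) = start + m := by omega
    obtain ⟨hB1, hB2, hB3, hB4⟩ := bestIdx_spec line start (start + m) (start + 1) start (start + m)
      (by omega) (by omega) (le_refl _)
      (fun t ht1 ht2 => by
        have : t = start := by omega
        subst this; exact le_refl _)
      (fun t ht1 ht2 => by omega)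
    set best := bestIdx line start (start + 1) (start + m) with hbest
    have hB2' : best < start + m := by omega
    have hval : line.getD best 0 = M :=
      le_antisymm (hwinM best hB1 hB2') (hMat ▸ hB3 (start + jm) (by omega) (by omega))
    -- unfold A one step
    rw [joltage]
    rw [if_neg (by push_cast; omega)]
    have hslice : PySem.List.slice l none (some ((l.length : Int) - ((((k:Nat)+1:Nat):Int) - 1))) = l.take m := by
      have : (l.length : Int) - ((((k:Nat)+1:Nat):Int) - 1) = ((m : Nat) : Int) := by
        push_cast; omega
      rw [this, PySem.List.slice_to_natCast]
    rw [hslice]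
    split
    · -- none arm: contradicts hMeq
      rename_i heq
      rw [hMeq] at heq
      exact absurd heq (by simp)
    · -- some arm
      rename_i first heq
      rw [hMeq] at heq
      obtain rfl : M = first := by injection heq
      by_cases hk0 : k = 0
      · subst hk0
        rw [if_pos (by norm_num)]
        rw [hfin]
        simp only [altLoop]
        rw [← hbest, hval]
        ring
      · rw [if_neg (by push_cast; omega)]
        split
        · -- index? returned none: impossible, M ∈ l
          rename_i heqI
          rw [PySem.List.index?_eq_none_iff] at heqI
          exact absurd hMl heqI
        · rename_i j heqI
          obtain ⟨hjlt, hjval, hjfirst⟩ := PySem.List.getElem_of_index?_eq_some heqI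
          -- j lies in the prefix
          have hjm' : j < m := by
            by_contra hge
            exact hjfirst jm (by omega) hjmval'
          have hjabs : line.getD (start + j) 0 = M := by
            rw [habs j (by omega), List.getD_eq_getElem l 0 (by omega), hjval]
          -- elements strictly before start+j are < M
          have hwin_lt : ∀ t, start ≤ t → t < start + j → line.getD t 0 < line.getD (start + j) 0 := by
            intro t ht1 ht2
            have htj : t - start < j := by omega
            have hne : l[t - start]'(by omega) ≠ M := hjfirst (t - start) htj
            have he : line.getD t 0 = l[t - start]'(by omega) := by
              have := habs (t - start) (by omega)
              rw [show start + (t - start) = t from by omega] at this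
              rw [this, List.getD_eq_getElem l 0 (by omega)]
            have hle : line.getD t 0 ≤ M := hwinM t ht1 (by omega)
            rw [hjabs]
            rw [he] at hle ⊢
            omega
          -- best is exactly start + j
          have hbj : best = start + j :=
            argmax_unique line start best (start + j) hB1 (by omega) hB4 hwin_lt
              (hB3 (start + j) (by omega) (by omega)) (by rw [hjabs]; exact hwinM best hB1 hB2')
          -- A's rest = line.drop (start + j + 1)
          have hrest : PySem.List.slice l (some ((j : Int) + 1)) none = line.drop (start + j + 1) := by
            have : ((j : Int) + 1) = (((j + 1 : Nat)) : Int) := by push_cast; ring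
            rw [this, PySem.List.slice_from_natCast, hl, List.drop_drop]
            congr 1
          rw [hrest]
          have hfix : ((((k:Nat)+1:Nat):Int) - 1) = ((k : Nat) : Int) := by push_cast; ring
          rw [hfix]
          rw [ih (start + j + 1) (by omega) (by omega)]
          -- unfold B one step
          rw [hfin]
          simp only [altLoop]
          rw [altLoop_add, ← hbest, hval, hbj]
          rw [show start + j + 1 + (line.length - (start + j + 1)) + 1 - k = start + m + 1 from by omega]
          rw [altLoop_add line k (0 + M)]
          ring

-- ===== VERDICT (by name: the statement is the Claim_ definition above) =====
theorem joltage_spec : Claim_equal_joltage := by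
  intro line remaining _hdom hpre
  obtain ⟨h1, h2⟩ := hpre
  unfold Spec_joltage joltage_alt
  rw [if_neg (by push_cast; omega)]
  have hk : (remaining.toNat : Int) = remaining := Int.toNat_of_nonneg (by omega)
  have hk1 : 1 ≤ remaining.toNat := by omega
  have hk2 : 0 + remaining.toNat ≤ line.length := by
    have : (remaining.toNat : Int) ≤ (line.length : Int) := by rw [hk]; exact h2
    omega
  have := main_loop line remaining.toNat 0 hk1 hk2
  rw [List.drop_zero, hk] at this
  rw [this]
  congr 1
  omega
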